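-- pv_equiv track=rewrite | github.com/Sayantan-coder/Edabith-Hard-level | Prulazie.py | prulaize
-- ===== SOURCE A (Python) =====
-- def prulaize(words_list: list) -> set:
--     words_set = set()
--     words = {}
--     for word in words_list:
--         if word in words:
--             words[word] = words[word] + 1
--         else:
--             words[word] = 1
--     for word_ in words:
--         if words[word_] > 1:
--             word_ += "s"
--             words_set.add(word_)
--         else:
--             words_set.add(word_)
--     return words_set
-- ===== SOURCE B (Python) =====
-- def prulaize(words_list: list) -> set:
--     result = set()
--     for i, w in enumerate(words_list):
--         if w not in words_list[:i]:
--             result.add(w + "s" if w in words_list[i + 1:] else w)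
--     return result
-- ===== Notes on version B (the rewrite author's own statement) =====
-- stated objective: alternative
-- what changed: Replaces A's two-pass count-dictionary (build a counter dict, then iterate it) with a single pass over enumerate(words_list) that detects first occurrences via the preceding slice and duplicates via the following slice, so no dictionary is built.
import Mathlib
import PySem

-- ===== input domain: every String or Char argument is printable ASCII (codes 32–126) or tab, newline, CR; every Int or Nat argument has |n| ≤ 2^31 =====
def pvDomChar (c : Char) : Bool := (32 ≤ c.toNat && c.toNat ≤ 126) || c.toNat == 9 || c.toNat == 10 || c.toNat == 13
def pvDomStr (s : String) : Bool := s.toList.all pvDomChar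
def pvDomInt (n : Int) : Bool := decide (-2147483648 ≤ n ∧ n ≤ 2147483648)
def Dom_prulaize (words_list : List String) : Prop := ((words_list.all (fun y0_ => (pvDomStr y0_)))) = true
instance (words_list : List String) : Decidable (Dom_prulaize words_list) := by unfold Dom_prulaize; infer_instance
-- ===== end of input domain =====

-- B replaces A's two-pass count-dictionary by a single pass over enumerate(words_list)
-- using the preceding/following slices to detect first occurrences and duplicates (objective: alternative).


-- ===== PORT A =====
def prulaize (words_list : List String) : List String :=
  let words : PySem.Dict String Int := words_list.foldl
    (fun words word =>
      if words.contains word then words.insert word (words.getD word 0 + 1)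
      else words.insert word 1)
    PySem.Dict.empty
  words.keys.foldl
    (fun words_set word_ =>
      if words.getD word_ 0 > 1 then PySem.Set.add words_set (word_ ++ "s")
      else PySem.Set.add words_set word_)
    PySem.Set.empty

-- ===== PORT B =====
def prulaize_alt (words_list : List String) : List String :=
  (PySem.List.enumerate words_list).foldl
    (fun result p =>
      if !(PySem.List.slice words_list none (some p.1)).contains p.2 then
        PySem.Set.add result
          (if (PySem.List.slice words_list (some (p.1 + 1)) none).contains p.2
           then p.2 ++ "s" else p.2)
      else result)
    PySem.Set.empty

-- ===== PRECONDITION & SPEC =====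
def Spec_prulaize (words_list : List String) (out : List String) : Prop := out = prulaize_alt words_list
instance (words_list : List String) (out : List String) : Decidable (Spec_prulaize words_list out) := by unfold Spec_prulaize; infer_instance

-- ===== CLAIM (what is proved, stated in full; the proofs are below) =====
def Claim_equal_prulaize : Prop := ∀ (words_list : List String), Dom_prulaize words_list → Spec_prulaize words_list (prulaize words_list)

-- ===== LEMMAS AND PROOFS =====

-- A's first loop (contains-branching increment) is exactly Counter(words_list)
lemma prulaize_dict_eq_counter (xs : List String) :
    xs.foldl
      (fun words word =>
        if words.contains word then words.insert word (words.getD word 0 + 1)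
        else words.insert word 1)
      (PySem.Dict.empty : PySem.Dict String Int)
    = PySem.Dict.counter xs := by
  rw [← PySem.Dict.foldl_insert_getD_add_one_eq_counter]
  congr 1
  funext d w
  by_cases h : d.contains w
  · simp [h]
  · have h' : d.contains w = false := by simpa using h
    simp [h', PySem.Dict.getD_of_not_contains d 0 h']

-- B's enumerate/slice fold, started after a processed prefix `pre`, equals the
-- count-conditioned fold over the still-unseen first occurrences of xs.
lemma prulaize_alt_fold (xs : List String) :
    ∀ (suf pre acc : List String), xs = pre ++ suf →
    (PySem.List.enumerate suf (pre.length : Int)).foldl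
      (fun result p =>
        if !(PySem.List.slice xs none (some p.1)).contains p.2 then
          PySem.Set.add result
            (if (PySem.List.slice xs (some (p.1 + 1)) none).contains p.2
             then p.2 ++ "s" else p.2)
        else result) acc
    = ((PySem.Set.ofList xs).drop (PySem.Set.ofList pre).length).foldl
        (fun words_set word_ =>
          if ((xs.count word_ : Int)) > 1 then PySem.Set.add words_set (word_ ++ "s")
          else PySem.Set.add words_set word_) acc := by
  intro suf
  induction suf with
  | nil =>
    intro pre acc hx
    subst hx
    simp [PySem.List.enumerate_nil, List.drop_length]
  | cons w suf ih =>
    intro pre acc hx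
    rw [PySem.List.enumerate_cons]
    have hlen : ((pre.length : Int) + 1) = (((pre ++ [w]).length : Nat) : Int) := by
      simp
    have hx' : xs = (pre ++ [w]) ++ suf := by simp [hx]
    have htake : PySem.List.slice xs none (some (pre.length : Int)) = pre := by
      rw [PySem.List.slice_to_natCast, hx, List.take_left]
    have hdrop : PySem.List.slice xs (some ((pre.length : Int) + 1)) none = suf := by
      rw [hlen, PySem.List.slice_from_natCast, hx', List.drop_left]
    simp only [List.foldl_cons]
    by_cases hw : w ∈ pre
    · -- not a first occurrence: B skips, and ofList (pre ++ [w]) = ofList pre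
      have hstep :
          (if !(PySem.List.slice xs none (some ((pre.length : Nat) : Int))).contains w then
            PySem.Set.add acc
              (if (PySem.List.slice xs (some (((pre.length : Nat) : Int) + 1)) none).contains w
               then w ++ "s" else w)
          else acc) = acc := by
        rw [htake]
        simp [hw]
      rw [hstep, hlen, ih (pre ++ [w]) acc hx']
      have : PySem.Set.ofList (pre ++ [w]) = PySem.Set.ofList pre := by
        rw [PySem.Set.ofList_append_singleton, PySem.Set.add_of_mem]
        rw [PySem.Set.mem_ofList]; exact hw
      rw [this]
    · -- first occurrence of w
      have hofw : PySem.Set.ofList (pre ++ [w]) = PySem.Set.ofList pre ++ [w] := by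
        rw [PySem.Set.ofList_append_singleton, PySem.Set.add_of_not_mem]
        intro hc; exact hw ((PySem.Set.mem_ofList _ _).mp hc)
      obtain ⟨rest, hrest⟩ :
          ∃ rest, PySem.Set.ofList xs = (PySem.Set.ofList pre ++ [w]) ++ rest := by
        refine ⟨(PySem.Set.ofList suf).filter
          (fun y => !(PySem.Set.contains (PySem.Set.ofList (pre ++ [w])) y)), ?_⟩
        rw [hx', PySem.Set.ofList_append, PySem.Set.update_eq_append_filter, hofw]
      have hcond : (suf.contains w) = decide ((xs.count w : Int) > 1) := by
        have hc : xs.count w = suf.count w + 1 := by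
          rw [hx]
          simp [List.count_append, List.count_cons_self,
            List.count_eq_zero_of_not_mem hw]
        by_cases hws : w ∈ suf
        · have : 0 < suf.count w := List.count_pos_iff.mpr hws
          simp [hws, hc]
        · have : suf.count w = 0 := List.count_eq_zero_of_not_mem hws
          simp [hws, hc, this]
      have hstep :
          (if !(PySem.List.slice xs none (some ((pre.length : Nat) : Int))).contains w then
            PySem.Set.add acc
              (if (PySem.List.slice xs (some (((pre.length : Nat) : Int) + 1)) none).contains w
               then w ++ "s" else w)
          else acc)
          = PySem.Set.add acc (if ((xs.count w : Int)) > 1 then w ++ "s" else w) := by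
        rw [htake, hdrop, hcond]
        simp [hw]
      rw [hstep, hlen, ih (pre ++ [w]) _ hx', hofw, hrest]
      have h1 : ((PySem.Set.ofList pre ++ [w]) ++ rest).drop (PySem.Set.ofList pre).length
          = w :: rest := by
        rw [List.append_assoc, List.drop_left]
        simp
      have h2 : ((PySem.Set.ofList pre ++ [w]) ++ rest).drop (PySem.Set.ofList pre ++ [w]).length
          = rest := List.drop_left
      rw [h1, h2, List.foldl_cons]
      congr 1
      split
      · rfl
      · rfl

-- ===== VERDICT (by name: the statement is the Claim_ definition above) =====
theorem prulaize_spec : Claim_equal_prulaize := by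
  intro xs _
  unfold Spec_prulaize prulaize prulaize_alt
  rw [prulaize_dict_eq_counter]
  simp only [PySem.Dict.keys_counter, PySem.Dict.getD_counter]
  have := prulaize_alt_fold xs xs [] PySem.Set.empty (by simp)
  simp only [List.length_nil, Nat.cast_zero] at this
  rw [this]
  simp [PySem.Set.ofList_nil, PySem.Set.empty]
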